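-- pv_equiv track=rewrite | github.com/sonic-net/sonic-mgmt | test_analyzer/sentinel.py | _parse_column_positions
-- ===== SOURCE A (Python) =====
-- def _parse_column_positions(sep_line, sep_char='-'):
--     """Parse the position of each columns in the command output
--
--     Args:
--         sep_line: The output line separating actual data and column headers
--         sep_char: The character used in separation line. Defaults to '-'.
--
--     Returns:
--         Returns a list. Each item is a tuple with two elements. The first element is start position of a column. The
--         second element is the end position of the column.
--     """
--     prev = ' ',
--     positions = []
--     for pos, char in enumerate(sep_line + ' '):
--         if char == sep_char:
--             if char != prev:
--                 left = pos
--         else: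
--             if char != prev:
--                 right = pos
--                 positions.append((left, right))
--         prev = char
--     return positions
-- ===== SOURCE B (Python) =====
-- def _parse_column_positions(sep_line, sep_char='-'):
--     """Parse column (start, end) positions from a separator line.
--
--     Run-length scan: jump over each maximal run of equal characters at once;
--     a run of the separator char opens a column at its start, any other run
--     closes it at its start. A trailing space sentinel closes the last column.
--     """
--     s = sep_line + ' '
--     n = len(s)
--     positions = []
--     i = 0
--     while i < n:
--         j = i + 1
--         while j < n and s[j] == s[i]:
--             j += 1
--         if s[i] == sep_char:
--             left = i
--         else:
--             positions.append((left, i))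
--         i = j
--     return positions
-- ===== Notes on version B (the rewrite author's own statement) =====
-- stated objective: alternative
-- what changed: Replaced the per-character scan that tracks the previous character with a run-length scan that jumps over each maximal run of equal characters at once, opening a column at the start of a separator run and closing it at the start of any other run.
-- outside the precondition, e.g. on _parse_column_positions('a--', '-'): A raises UnboundLocalError, B raises UnboundLocalError; on _parse_column_positions('', '-'): A raises UnboundLocalError, B raises UnboundLocalError
import Mathlib
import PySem

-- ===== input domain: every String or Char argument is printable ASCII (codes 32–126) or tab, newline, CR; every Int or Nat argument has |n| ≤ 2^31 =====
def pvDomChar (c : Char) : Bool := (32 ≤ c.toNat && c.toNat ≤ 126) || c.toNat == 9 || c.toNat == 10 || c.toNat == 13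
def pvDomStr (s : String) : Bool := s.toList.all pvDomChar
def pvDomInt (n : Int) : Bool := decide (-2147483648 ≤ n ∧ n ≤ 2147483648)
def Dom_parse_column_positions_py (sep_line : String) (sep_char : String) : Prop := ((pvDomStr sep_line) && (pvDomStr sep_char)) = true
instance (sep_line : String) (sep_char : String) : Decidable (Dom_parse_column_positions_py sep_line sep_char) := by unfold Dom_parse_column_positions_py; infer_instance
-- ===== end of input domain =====

-- B replaces A's per-character previous-char tracking by a run-length scan over maximal
-- runs of equal characters (alternative decomposition, same O(n) cost).


-- ===== PORT A =====
-- One loop step of A: state is (prev, left, positions); Python's initial `prev = ' ',`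
-- is a TUPLE, never equal to a 1-char string, modelled as prev : List Char = [];
-- `left` starts unbound (Option Int, none); `.getD 0` is only reached outside Pre_.
def aStep (sc : List Char) (st : List Char × Option Int × List (Int × Int))
    (pc : Int × Char) : List Char × Option Int × List (Int × Int) :=
  let prev := st.1
  let left := st.2.1
  let positions := st.2.2
  let pos := pc.1
  let char := pc.2
  if [char] = sc then
    if [char] ≠ prev then ([char], some pos, positions)
    else ([char], left, positions)
  else
    if [char] ≠ prev then ([char], left, positions ++ [(left.getD 0, pos)])
    else ([char], left, positions)

def parse_column_positions_py (sep_line : String) (sep_char : String) : List (Int × Int) :=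
  (List.foldl (aStep sep_char.toList) ([], none, [])
    (PySem.List.enumerate (sep_line.toList ++ [' ']) 0)).2.2

-- ===== PORT B =====
-- Outer while loop of Source B: consume one maximal run of equal characters per call.
def bGo (sc : List Char) (s : List Char) (pos : Int) (left : Option Int)
    (acc : List (Int × Int)) : List (Int × Int) :=
  match s with
  | [] => acc
  | c :: rest =>
    -- inner while: j advances past the run of characters equal to s[i]
    let run := rest.takeWhile (fun x => x = c)
    let rest' := rest.dropWhile (fun x => x = c)
    if [c] = sc then bGo sc rest' (pos + 1 + run.length) (some pos) acc
    else bGo sc rest' (pos + 1 + run.length) left (acc ++ [(left.getD 0, pos)])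
  termination_by s.length
  decreasing_by
    all_goals
      have := List.length_dropWhile_le (fun x => x = c) rest
      simp; omega

def parse_column_positions_py_alt (sep_line : String) (sep_char : String) : List (Int × Int) :=
  bGo sep_char.toList (sep_line.toList ++ [' ']) 0 none []

-- ===== PRECONDITION & SPEC =====
-- Pre_ excludes exactly the inputs where both programs raise UnboundLocalError:
-- whenever the first character of sep_line + ' ' is not (the sole character of)
-- sep_char, a column is closed before one was ever opened and `left` is unbound.
def Pre_parse_column_positions_py (sep_line : String) (sep_char : String) : Prop :=
  sep_char.toList = [(sep_line.toList ++ [' ']).headD ' ']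
instance (sep_line : String) (sep_char : String) : Decidable (Pre_parse_column_positions_py sep_line sep_char) := by unfold Pre_parse_column_positions_py; infer_instance

def pvWitness_parse_column_positions_py : String × String := ("---  -- -", "-")

def Spec_parse_column_positions_py (sep_line : String) (sep_char : String) (out : List (Int × Int)) : Prop := out = parse_column_positions_py_alt sep_line sep_char
instance (sep_line : String) (sep_char : String) (out : List (Int × Int)) : Decidable (Spec_parse_column_positions_py sep_line sep_char out) := by unfold Spec_parse_column_positions_py; infer_instance

-- ===== CLAIM (what is proved, stated in full; the proofs are below) =====
def Claim_equal_parse_column_positions_py : Prop := ∀ (sep_line : String) (sep_char : String), Dom_parse_column_positions_py sep_line sep_char → Pre_parse_column_positions_py sep_line sep_char → Spec_parse_column_positions_py sep_line sep_char (parse_column_positions_py sep_line sep_char)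

-- ===== LEMMAS AND PROOFS =====

-- Folding aStep over a run of characters all equal to the previous one leaves the state unchanged.
lemma aStep_skip_run (sc : List Char) (c : Char) (run : List Char)
    (h : ∀ x ∈ run, x = c) (rest : List Char) (i : Int) (left : Option Int)
    (acc : List (Int × Int)) :
    List.foldl (aStep sc) ([c], left, acc) (PySem.List.enumerate (run ++ rest) i)
      = List.foldl (aStep sc) ([c], left, acc)
          (PySem.List.enumerate rest (i + run.length)) := by
  induction run generalizing i with
  | nil => simp
  | cons x xs ih =>
    have hx : x = c := h x (by simp)
    subst hx
    rw [List.cons_append, PySem.List.enumerate_cons, List.foldl_cons]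
    have hstep : aStep sc ([x], left, acc) (i, x) = ([x], left, acc) := by
      simp [aStep]
    rw [hstep, ih (fun y hy => h y (by simp [hy]))]
    have : i + 1 + (xs.length:Int) = i + ((x :: xs).length:Int) := by
      simp only [List.length_cons]; push_cast; ring
    rw [this]

-- Main invariant: starting at a run boundary (prev differs from the head character),
-- A's fold computes exactly B's run-length recursion.
lemma main_inv (sc : List Char) (s : List Char) (i : Int) (left : Option Int)
    (acc : List (Int × Int)) (prev : List Char)
    (hprev : ∀ c, s.head? = some c → prev ≠ [c]) :
    (List.foldl (aStep sc) (prev, left, acc) (PySem.List.enumerate s i)).2.2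
      = bGo sc s i left acc := by
  induction hn : s.length using Nat.strong_induction_on generalizing s i left acc prev with
  | _ n ih =>
    match s with
    | [] => simp [bGo]
    | c :: rest =>
      have hne : prev ≠ [c] := hprev c rfl
      rw [PySem.List.enumerate_cons, List.foldl_cons]
      have hrest : rest = rest.takeWhile (fun x => x = c) ++ rest.dropWhile (fun x => x = c) :=
        (List.takeWhile_append_dropWhile).symm
      have hmem : ∀ x ∈ rest.takeWhile (fun x => x = c), x = c := by
        intro x hx
        simpa using List.mem_takeWhile_imp hx
      have hhead : ∀ d, (rest.dropWhile (fun x => x = c)).head? = some d → [c] ≠ [d] := by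
        intro d hd hcd
        have : ¬ ((fun x => decide (x = c)) d = true) := by
          have := List.head?_dropWhile_not (fun x => decide (x = c)) rest
          intro hcontra
          exact absurd hcontra (by simpa [hd] using this)
        simp at this
        exact this (by simpa using hcd.symm)
      have hlen : (rest.dropWhile (fun x => x = c)).length < n := by
        have := List.length_dropWhile_le (fun x => x = c) rest
        simp at hn; omega
      by_cases hc : [c] = sc
      · have hstep : aStep sc (prev, left, acc) (i, c) = ([c], some i, acc) := by
          simp only [aStep]
          rw [if_pos hc, if_pos (fun h => hne h.symm)]
        rw [hstep]
        conv_lhs => rw [hrest]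
        rw [aStep_skip_run sc c _ hmem _ _ _ _,
            ih _ hlen _ _ _ _ _ hhead rfl]
        simp [bGo, hc]
      · have hstep : aStep sc (prev, left, acc) (i, c)
            = ([c], left, acc ++ [(left.getD 0, i)]) := by
          simp only [aStep]
          rw [if_neg hc, if_pos (fun h => hne h.symm)]
        rw [hstep]
        conv_lhs => rw [hrest]
        rw [aStep_skip_run sc c _ hmem _ _ _ _,
            ih _ hlen _ _ _ _ _ hhead rfl]
        simp [bGo, hc]

-- ===== VERDICT (by name: the statement is the Claim_ definition above) =====
theorem parse_column_positions_py_spec : Claim_equal_parse_column_positions_py := by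
  intro sep_line sep_char _ hpre
  unfold Spec_parse_column_positions_py
  unfold parse_column_positions_py parse_column_positions_py_alt
  apply main_inv
  intro c hc
  simp
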